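-- pv_equiv track=rewrite | github.com/felwal/scripts | md_formatter.py | is_ol_li
-- ===== SOURCE A (Python) =====
-- numbers = list("0123456789")
--
-- def is_ol_li(line: str):
--     line = line.strip()
--
--     dotindex = line.find(".")
--
--     if dotindex not in [-1, 0]:
--         potential_number = line[:dotindex]
--         for c in potential_number:
--             if c not in numbers:
--                 return False
--
--         return len(line) == dotindex + 1 or line[dotindex + 1] == " "
--
--     return False
-- ===== SOURCE B (Python) =====
-- def is_ol_li(line: str):
--     s = line.strip()
--     i = 0
--     while i < len(s) and "0" <= s[i] <= "9":
--         i += 1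
--     return 0 < i < len(s) and s[i] == "." and (i + 1 == len(s) or s[i + 1] == " ")
-- ===== Notes on version B (the rewrite author's own statement) =====
-- stated objective: alternative
-- what changed: Instead of locating the first dot with find and then validating the slice before it with a membership loop, B does one left-to-right scan that consumes the leading digit run and then directly inspects the next one or two characters.
import Mathlib
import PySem

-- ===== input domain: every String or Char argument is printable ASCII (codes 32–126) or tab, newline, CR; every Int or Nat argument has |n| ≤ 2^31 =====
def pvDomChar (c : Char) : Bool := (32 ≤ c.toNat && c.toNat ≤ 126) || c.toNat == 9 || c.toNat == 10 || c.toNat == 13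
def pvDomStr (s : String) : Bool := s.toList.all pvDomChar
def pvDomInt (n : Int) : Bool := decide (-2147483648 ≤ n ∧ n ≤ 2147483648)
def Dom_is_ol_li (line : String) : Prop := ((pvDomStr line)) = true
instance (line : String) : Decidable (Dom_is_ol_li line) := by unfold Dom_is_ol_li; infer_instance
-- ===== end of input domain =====

-- B replaces A's search-for-the-dot-then-validate-the-prefix strategy with one left-to-right
-- scan that consumes the leading digit run and inspects the next one or two characters (alternative; same cost).

-- ===== PORT A =====
-- numbers = list("0123456789")
def numbersA : List Char := "0123456789".toList

-- the for-loop over potential_number: 'some false' = the early 'return False', 'none' = fall through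
def loopA : List Char → Option Bool
  | [] => none
  | c :: rest => if !(numbersA.contains c) then some false else loopA rest

def is_ol_li (line : String) : Bool :=
  let l := (PySem.Str.strip line).toList
  let dotindex := PySem.Chars.find l ['.']
  if !([(-1 : Int), 0].contains dotindex) then
    let potential := PySem.Chars.slice l none (some dotindex)
    match loopA potential with
    | some b => b
    | none =>
        decide ((PySem.Chars.len l : Int) = dotindex + 1)
          || (PySem.Chars.pyGet? l (dotindex + 1) == some ' ')
  else false

-- ===== PORT B =====
-- the while-loop's final i: how many leading characters satisfy "0" <= c <= "9"
def leadDigits : List Char → Nat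
  | [] => 0
  | c :: t => if decide ('0' ≤ c) && decide (c ≤ '9') then leadDigits t + 1 else 0

def is_ol_li_alt (line : String) : Bool :=
  let s := (PySem.Str.strip line).toList
  let i := leadDigits s
  decide (0 < i) && decide (i < s.length)
    && (s[i]? == some '.')
    && (decide (i + 1 = s.length) || (s[i + 1]? == some ' '))

-- ===== PRECONDITION & SPEC =====
def Spec_is_ol_li (line : String) (out : Bool) : Prop := out = is_ol_li_alt line
instance (line : String) (out : Bool) : Decidable (Spec_is_ol_li line out) := by unfold Spec_is_ol_li; infer_instance

-- ===== CLAIM (what is proved, stated in full; the proofs are below) =====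
def Claim_equal_is_ol_li : Prop := ∀ (line : String), Dom_is_ol_li line → Spec_is_ol_li line (is_ol_li line)

-- ===== LEMMAS AND PROOFS =====

theorem contains_numbersA (c : Char) : numbersA.contains c = PySem.Chars.isdigit c := by
  have h : numbersA = ['0','1','2','3','4','5','6','7','8','9'] := by decide
  rw [h]
  simp only [List.contains_cons, List.contains_nil, PySem.Chars.isdigit, Bool.or_false]
  rw [Bool.eq_iff_iff]
  simp only [Bool.or_eq_true, beq_iff_eq, Char.ext_iff, Bool.and_eq_true, decide_eq_true_eq,
    Char.le_def, ← UInt32.toNat_inj, UInt32.le_iff_toNat_le]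
  rw [show '0'.val.toNat = 48 from rfl, show '1'.val.toNat = 49 from rfl,
      show '2'.val.toNat = 50 from rfl, show '3'.val.toNat = 51 from rfl,
      show '4'.val.toNat = 52 from rfl, show '5'.val.toNat = 53 from rfl,
      show '6'.val.toNat = 54 from rfl, show '7'.val.toNat = 55 from rfl,
      show '8'.val.toNat = 56 from rfl, show '9'.val.toNat = 57 from rfl]
  omega

theorem loopA_eq (p : List Char) :
    loopA p = if p.all PySem.Chars.isdigit then none else some false := by
  induction p with
  | nil => rfl
  | cons c rest ih =>
    simp only [loopA, contains_numbersA, List.all_cons, ih]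
    by_cases h : PySem.Chars.isdigit c = true <;> simp [h]

theorem digitTest_eq (c : Char) :
    (decide ('0' ≤ c) && decide (c ≤ '9')) = PySem.Chars.isdigit c := rfl

theorem singleton_isPrefixOf (c : Char) (xs : List Char) :
    [c].isPrefixOf xs = (xs.head? == some c) := by
  cases xs with
  | nil => rfl
  | cons a t => simp [List.isPrefixOf, BEq.comm]

theorem leadDigits_le (l : List Char) : leadDigits l ≤ l.length := by
  induction l with
  | nil => simp [leadDigits]
  | cons c t ih => simp only [leadDigits, List.length_cons]; split <;> omega

theorem take_leadDigits_all (l : List Char) :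
    (l.take (leadDigits l)).all PySem.Chars.isdigit = true := by
  induction l with
  | nil => rfl
  | cons c t ih =>
    simp only [leadDigits, digitTest_eq]
    split
    · next h => simpa [List.take_succ_cons, h] using ih
    · simp

theorem leadDigits_ge (l : List Char) (k : Nat) (hk : k ≤ l.length)
    (hall : (l.take k).all PySem.Chars.isdigit = true) : k ≤ leadDigits l := by
  induction l generalizing k with
  | nil =>
    simp only [List.length_nil, Nat.le_zero] at hk
    simp [hk]
  | cons c t ih =>
    cases k with
    | zero => simp
    | succ k' =>
      simp only [List.take_succ_cons, List.all_cons, Bool.and_eq_true] at hall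
      simp only [leadDigits, digitTest_eq, hall.1, if_true]
      have := ih k' (by simpa using hk) hall.2
      omega

theorem core_eq (l : List Char) :
    (let dotindex := PySem.Chars.find l ['.']
     if !([(-1 : Int), 0].contains dotindex) then
       let potential := PySem.Chars.slice l none (some dotindex)
       match loopA potential with
       | some b => b
       | none =>
           decide ((PySem.Chars.len l : Int) = dotindex + 1)
             || (PySem.Chars.pyGet? l (dotindex + 1) == some ' ')
     else false)
    = (let i := leadDigits l
       decide (0 < i) && decide (i < l.length)
         && (l[i]? == some '.')
         && (decide (i + 1 = l.length) || (l[i + 1]? == some ' '))) := by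
  show (if !([(-1 : Int), 0].contains (PySem.Chars.find l ['.'])) then _ else false) = _
  have hrle := leadDigits_le l
  -- a '.' sits at index i iff ['.'] is a prefix of the drop at i
  have hdot : ∀ i : Nat, ([('.' : Char)] <+: l.drop i) ↔ l[i]? = some '.' := by
    intro i
    rw [← List.isPrefixOf_iff_prefix, singleton_isPrefixOf, ← List.head?_drop]
    simp
  have hdotdigit : PySem.Chars.isdigit '.' = false := by decide
  by_cases h1 : PySem.Chars.find l ['.'] = -1
  · -- no dot at all: both sides false
    have hno : ¬ [('.' : Char)] <:+: l := (PySem.Chars.find_eq_neg_one_iff l ['.']).1 h1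
    have hx : (l[leadDigits l]? == some '.') = false := by
      simp only [beq_eq_false_iff_ne, ne_eq]
      intro hc
      exact hno (List.infix_iff_prefix_suffix.2
        ⟨_, (hdot (leadDigits l)).2 hc, List.drop_suffix (leadDigits l) l⟩)
    simp [h1, hx]
  by_cases h0 : PySem.Chars.find l ['.'] = 0
  · -- the dot is first: A returns False; leadDigits = 0 so B is false too
    have hpre := (PySem.Chars.find_spec (s := l) (sub := ['.'])
      (le_of_eq h0.symm)).1
    rw [h0] at hpre
    have hhead : l[0]? = some '.' := (hdot 0).1 (by simpa using hpre)
    have hr0 : leadDigits l = 0 := by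
      cases l with
      | nil => simp at hhead
      | cons c t =>
        simp only [List.getElem?_cons_zero, Option.some.injEq] at hhead
        simp [leadDigits, hhead]
    simp [h0, hr0]
  · have hge : (0:Int) ≤ PySem.Chars.find l ['.'] := by
      have := PySem.Chars.neg_one_le_find l ['.']; omega
    obtain ⟨n, hn⟩ : ∃ n : Nat, PySem.Chars.find l ['.'] = (n : Int) :=
      ⟨(PySem.Chars.find l ['.']).toNat, by omega⟩
    have hspec := PySem.Chars.find_spec (s := l) (sub := ['.']) hge
    rw [hn] at hspec h0
    simp only [Int.toNat_natCast] at hspec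
    have hdotd : l[n]? = some '.' := (hdot n).1 hspec.1
    have hmin : ∀ i < n, l[i]? ≠ some '.' := fun i hi hc =>
      hspec.2 i (by omega) ((hdot i).2 hc)
    have hlt : n < l.length := by
      by_contra hc
      simp [List.getElem?_eq_none (show l.length ≤ n by omega)] at hdotd
    have hn1 : 1 ≤ n := by omega
    rw [hn]
    have hbne : (((n : Int) == -1 || (n : Int) == 0) = false) := by
      simp only [Bool.or_eq_false_iff, beq_eq_false_iff_ne, ne_eq]
      refine ⟨by omega, by omega⟩
    simp only [List.contains_cons, List.contains_nil, Bool.or_false, hbne,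
      Bool.not_false, if_true, PySem.Chars.slice_eq_listSlice,
      PySem.Chars.len_eq, PySem.Chars.pyGet?_eq_listPyGet?]
    rw [PySem.List.slice_to_natCast, loopA_eq,
      show ((n : Nat) : Int) + 1 = ((n + 1 : Nat) : Int) by push_cast; ring,
      PySem.List.pyGet?_natCast]
    by_cases ha : (l.take n).all PySem.Chars.isdigit
    · -- all-digit prefix up to the dot: the scan stops exactly at the dot, leadDigits l = n
      have hge' : n ≤ leadDigits l := leadDigits_ge l n (by omega) ha
      have hle' : leadDigits l ≤ n := by
        by_contra hc
        have hmem : l[n] ∈ l.take (leadDigits l) := by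
          rw [List.mem_take_iff_getElem]
          exact ⟨n, by omega, rfl⟩
        have hdig := List.all_eq_true.1 (take_leadDigits_all l) _ hmem
        have hEq : l[n] = '.' := by
          rw [List.getElem?_eq_getElem hlt] at hdotd
          exact Option.some.inj hdotd
        rw [hEq, hdotdigit] at hdig
        exact Bool.noConfusion hdig
      have hrd : leadDigits l = n := le_antisymm hle' hge'
      have hEq : l[n] = '.' := by
        rw [List.getElem?_eq_getElem hlt] at hdotd
        exact Option.some.inj hdotd
      have hiff : ((l.length : Int) = (n : Int) + 1) = (n + 1 = l.length) := by
        apply propext; omega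
      simp [ha, hrd, hEq, hlt, hiff, Nat.pos_iff_ne_zero, show n ≠ 0 by omega]
    · -- a non-digit before the dot: A returns False; the scan stops before the dot and sees a non-dot
      have hrlt : leadDigits l < n := by
        by_contra hc
        apply ha
        have ht : l.take n = (l.take (leadDigits l)).take n := by
          rw [List.take_take]
          congr 1
          omega
        rw [ht]
        exact List.all_eq_true.2 fun x hx =>
          List.all_eq_true.1 (take_leadDigits_all l) x (List.take_subset _ _ hx)
      have hne : (l[leadDigits l]? == some '.') = false := by
        simp only [beq_eq_false_iff_ne, ne_eq]
        exact hmin _ hrlt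
      simp [ha, hne]

-- ===== VERDICT (by name: the statement is the Claim_ definition above) =====
theorem is_ol_li_spec : Claim_equal_is_ol_li := by
  intro line _
  unfold Spec_is_ol_li is_ol_li is_ol_li_alt
  exact core_eq (PySem.Str.strip line).toList
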